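-- pv_equiv track=rewrite | github.com/JonathonLeiding/pineapple-poker-equity-calculator | evaluator.py | kicker
-- ===== SOURCE A (Python) =====
-- def kicker(fin_list, num_kickers, ret_list=False):
--     """
--     Sorts list into a rank ordered string
--
--     :param ret_list: Determines whether I return the list or string format
--     :param fin_list: list of cards
--     :param num_kickers: number of cards that need to be ranked
--     :return: String rep of the greatest kickers (Tie in rank goes to order of fin_list)
--
--             Recognizes the cards that aren't being used (like the pair) before function call
--     """
--     if len(fin_list) == 0:
--         raise Exception("Empty List of Cards")
--
--     final_str = ""
--     final_list = []
--     rank_dict = {"A": 13, "K": 12, "Q": 11, "J": 10, "T": 9, "9": 8, "8": 7, "7": 6, "6": 5, "5": 4, "4": 3, "3": 2,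
--                  "2": 1}
--
--     list_dict = {}
--
--     for elt in fin_list:
--         list_dict[elt] = rank_dict[elt[0]]  # Assigns values to each card in finList
--
--     sorted_dict = sorted(list_dict.items(), key=lambda x: x[1],
--                          reverse=True)  # List of tuples sorted Biggest to smallest
--
--     if ret_list:
--         for i in range(num_kickers):
--             final_list.append(sorted_dict[i][0])
--
--         return final_list
--
--     else:
--         for i in range(num_kickers):
--             final_str += sorted_dict[i][0]
--
--         return final_str
-- ===== SOURCE B (Python) =====
-- def kicker(fin_list, num_kickers, ret_list=False):
--     """Bucket pass over the fixed rank order instead of dict-build + sort."""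
--     if len(fin_list) == 0:
--         raise Exception("Empty List of Cards")
--
--     result = []
--     for r in "AKQJT98765432":  # ranks, highest first
--         for card in fin_list:  # original order breaks ties; membership test dedups
--             if card[0] == r and card not in result:
--                 result.append(card)
--
--     if ret_list:
--         return [result[i] for i in range(num_kickers)]
--
--     final_str = ""
--     for i in range(num_kickers):
--         final_str += result[i]
--     return final_str
-- ===== Notes on version B (the rewrite author's own statement) =====
-- stated objective: alternative
-- what changed: Replaces the build-a-card-dict-then-stable-sort pipeline with a bucket pass: iterate the 13 ranks from high to low and for each rank collect matching cards in original order, deduplicating by membership in the result list; Pre_ excludes ret_list=True, where A returns a Python list rather than a str (the ported return type), and the inputs where A raises (empty list, malformed card, num_kickers beyond the distinct cards).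
-- outside the precondition, e.g. on kicker(['AH', 'KD'], 2, True): A returns ['AH', 'KD'], B returns ['AH', 'KD']
import Mathlib
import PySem

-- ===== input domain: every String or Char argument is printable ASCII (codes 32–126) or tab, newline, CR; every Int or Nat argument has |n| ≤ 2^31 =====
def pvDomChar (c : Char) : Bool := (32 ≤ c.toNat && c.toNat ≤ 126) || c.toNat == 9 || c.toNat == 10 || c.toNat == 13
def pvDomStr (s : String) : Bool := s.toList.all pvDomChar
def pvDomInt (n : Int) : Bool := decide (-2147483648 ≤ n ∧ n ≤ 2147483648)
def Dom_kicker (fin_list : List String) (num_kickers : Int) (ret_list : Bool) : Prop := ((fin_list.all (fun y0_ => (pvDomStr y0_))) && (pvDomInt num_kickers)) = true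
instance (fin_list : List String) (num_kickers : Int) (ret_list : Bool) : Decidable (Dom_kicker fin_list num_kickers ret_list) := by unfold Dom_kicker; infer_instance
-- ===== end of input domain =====

-- B replaces A's dict-build-then-stable-sort by a bucket pass over the 13 ranks (alternative
-- decomposition, similar cost); equivalence is about the return value on ret_list=False only.

-- ===== PORT A =====
-- rank_dict, keyed by the card's first character (Python keys it by the 1-character string elt[0])
def rankDictA : PySem.Dict Char Int :=
  PySem.Dict.mk [('A',13),('K',12),('Q',11),('J',10),('T',9),('9',8),('8',7),('7',6),
                 ('6',5),('5',4),('4',3),('3',2),('2',1)]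

-- rank_dict[elt[0]]; none = Python raises IndexError (empty card) or KeyError (unknown rank)
def rankOfCardA (elt : String) : Option Int :=
  match PySem.Str.pyGet? elt 0 with
  | some c => PySem.Dict.get? rankDictA c
  | none => none

def kicker (fin_list : List String) (num_kickers : Int) (ret_list : Bool) : String :=
  if fin_list.length = 0 then ""  -- Python: raise Exception("Empty List of Cards"); excluded by Pre_
  else
    let list_dict : PySem.Dict String Int := fin_list.foldl (fun d elt =>
      match rankOfCardA elt with
      | some v => d.insert elt v
      | none => d) PySem.Dict.empty  -- none: Python raises here; excluded by Pre_
    let sorted_dict := PySem.List.sorted list_dict.items (fun x => x.2) true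
    if ret_list then
      ""  -- Python returns a LIST of cards here, not a str; excluded by Pre_
    else
      String.mk ((PySem.List.pyRange 0 num_kickers 1).foldl (fun s i =>
        match PySem.List.pyGet? sorted_dict i with
        | some p => s ++ p.1.toList
        | none => s) [])  -- none: Python raises IndexError; excluded by Pre_

-- ===== PORT B =====
def kicker_alt (fin_list : List String) (num_kickers : Int) (ret_list : Bool) : String :=
  if fin_list.length = 0 then ""  -- Python: raise Exception; excluded by Pre_
  else
    let result : List String := "AKQJT98765432".toList.foldl (fun acc r =>
      fin_list.foldl (fun acc card =>
        if (PySem.Str.pyGet? card 0 == some r) && !(acc.contains card) then acc ++ [card]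
        else acc) acc) []
    if ret_list then
      ""  -- Python returns a LIST here, not a str; excluded by Pre_
    else
      String.mk ((PySem.List.pyRange 0 num_kickers 1).foldl (fun s i =>
        match PySem.List.pyGet? result i with
        | some card => s ++ card.toList
        | none => s) [])

-- ===== PRECONDITION & SPEC =====
-- Pre_ excludes: ret_list=True, on which A returns a Python list, not a value of the declared
-- str type; and the inputs on which A raises (empty fin_list, a card that is empty or whose
-- first character is not a rank character, num_kickers exceeding the number of distinct cards).
def Pre_kicker (fin_list : List String) (num_kickers : Int) (ret_list : Bool) : Prop :=
  ret_list = false ∧ fin_list ≠ [] ∧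
  (∀ card ∈ fin_list, card.toList ≠ [] ∧
     card.toList.headD ' ' ∈ ['A','K','Q','J','T','9','8','7','6','5','4','3','2']) ∧
  num_kickers ≤ (PySem.List.dedup fin_list).length

instance (fin_list : List String) (num_kickers : Int) (ret_list : Bool) : Decidable (Pre_kicker fin_list num_kickers ret_list) := by unfold Pre_kicker; infer_instance

def pvWitness_kicker : List String × Int × Bool := (["AH", "KD", "AS", "AH"], 3, false)

def Spec_kicker (fin_list : List String) (num_kickers : Int) (ret_list : Bool) (out : String) : Prop := out = kicker_alt fin_list num_kickers ret_list
instance (fin_list : List String) (num_kickers : Int) (ret_list : Bool) (out : String) : Decidable (Spec_kicker fin_list num_kickers ret_list out) := by unfold Spec_kicker; infer_instance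

-- ===== CLAIM (what is proved, stated in full; the proofs are below) =====
def Claim_equal_kicker : Prop := ∀ (fin_list : List String) (num_kickers : Int) (ret_list : Bool), Dom_kicker fin_list num_kickers ret_list → Pre_kicker fin_list num_kickers ret_list → Spec_kicker fin_list num_kickers ret_list (kicker fin_list num_kickers ret_list)

-- ===== LEMMAS AND PROOFS =====

-- proof-only abbreviations
def rkChars : List Char := ['A','K','Q','J','T','9','8','7','6','5','4','3','2']
def rkVal (c : Char) : Int := (PySem.Dict.get? rankDictA c).getD 0
def rv (card : String) : Int := (rankOfCardA card).getD 0
def validCard (card : String) : Prop := card.toList ≠ [] ∧ card.toList.headD ' ' ∈ rkChars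

theorem hd?_eq (s : String) (c : Char) (t : List Char) (h : s.toList = c :: t) :
    PySem.Str.pyGet? s 0 = some c := by
  simp [PySem.Str.pyGet?, PySem.List.pyGet?, PySem.List.pyIdx?, h]

-- a valid card's first character and its rank value
theorem head_spec (card : String) (h : validCard card) :
    ∃ c ∈ rkChars, PySem.Str.pyGet? card 0 = some c ∧ rv card = rkVal c := by
  obtain ⟨h1, h2⟩ := h
  obtain ⟨c, t, hct⟩ : ∃ c t, card.toList = c :: t := by
    cases hc : card.toList with
    | nil => exact absurd hc h1
    | cons c t => exact ⟨c, t, rfl⟩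
  rw [hct] at h2; simp only [List.headD_cons] at h2
  have hg := hd?_eq card c t hct
  refine ⟨c, h2, hg, ?_⟩
  unfold rv rankOfCardA rkVal
  rw [hg]

theorem rankOfCardA_valid (card : String) (h : validCard card) :
    rankOfCardA card = some (rv card) := by
  obtain ⟨c, hc, hg, hrv⟩ := head_spec card h
  have hA : rankOfCardA card = PySem.Dict.get? rankDictA c := by
    unfold rankOfCardA
    rw [hg]
  rw [hA, hrv]
  fin_cases hc <;> decide

-- dedup appends a new last element, drops a repeated one
theorem dedup_append_singleton {α : Type} [BEq α] [LawfulBEq α] (l : List α) (x : α) :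
    PySem.List.dedup (l ++ [x]) =
      if x ∈ l then PySem.List.dedup l else PySem.List.dedup l ++ [x] := by
  have hmem : x ∈ List.foldl PySem.Set.add ([] : List α) l ↔ x ∈ l := by
    simpa [PySem.List.dedup, PySem.Set.ofList, PySem.Set.empty] using PySem.List.mem_dedup l x
  simp only [PySem.List.dedup, PySem.Set.ofList, List.foldl_append, List.foldl_cons,
    List.foldl_nil, PySem.Set.add, PySem.Set.empty]
  by_cases hx : x ∈ l <;> simp [hmem, hx]

theorem dedup_filter {α : Type} [BEq α] [LawfulBEq α] (p : α → Bool) (l : List α) :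
    PySem.List.dedup (l.filter p) = (PySem.List.dedup l).filter p := by
  induction l using List.reverseRecOn with
  | nil => simp [PySem.List.dedup, PySem.Set.ofList, PySem.Set.empty]
  | append_singleton l x ih =>
    by_cases hp : p x
    · have h1 : List.filter p (l ++ [x]) = List.filter p l ++ [x] := by
        simp [List.filter_append, hp]
      rw [h1, dedup_append_singleton, dedup_append_singleton]
      by_cases hx : x ∈ l
      · rw [if_pos (by simp [List.mem_filter, hx, hp]), if_pos hx, ih]
      · rw [if_neg (by simp [List.mem_filter, hx]), if_neg hx, ih, List.filter_append]
        simp [hp]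
    · have h1 : List.filter p (l ++ [x]) = List.filter p l := by
        simp [List.filter_append, hp]
      rw [h1, dedup_append_singleton]
      by_cases hx : x ∈ l
      · rw [if_pos hx, ih]
      · rw [if_neg hx, ih, List.filter_append]
        simp [hp]

-- (A) the dict loop: invariant over an already-processed prefix
theorem dict_fold_items (rest : List String) : ∀ pre : List String,
    (∀ card ∈ rest, validCard card) →
    (rest.foldl (fun d elt =>
      match rankOfCardA elt with
      | some v => d.insert elt v
      | none => d)
      (PySem.Dict.mk ((PySem.List.dedup pre).map (fun card => (card, rv card))))).items
    = (PySem.List.dedup (pre ++ rest)).map (fun card => (card, rv card)) := by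
  induction rest with
  | nil => intro pre _; simp
  | cons x rest ih =>
    intro pre hv
    have hx := rankOfCardA_valid x (hv x (by simp))
    have hstep : (PySem.Dict.mk ((PySem.List.dedup pre).map
          (fun card => (card, rv card)))).insert x (rv x)
        = PySem.Dict.mk ((PySem.List.dedup (pre ++ [x])).map (fun card => (card, rv card))) := by
      by_cases hmem : x ∈ pre
      · have hxD : x ∈ PySem.List.dedup pre := (PySem.List.mem_dedup pre x).mpr hmem
        have hc : ((PySem.List.dedup pre).map (fun card => (card, rv card))).any
            (fun p => p.1 == x) = true := by
          rw [List.any_eq_true]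
          exact ⟨(x, rv x), List.mem_map.mpr ⟨x, hxD, rfl⟩, by simp⟩
        simp only [PySem.Dict.insert, PySem.Dict.contains, hc, if_pos]
        rw [dedup_append_singleton, if_pos hmem]
        congr 1
        rw [List.map_map]
        apply List.map_congr_left
        intro card _
        by_cases hcx : card = x
        · simp [hcx]
        · simp [hcx]
      · have hc : ((PySem.List.dedup pre).map (fun card => (card, rv card))).any
            (fun p => p.1 == x) = false := by
          rw [List.any_eq_false]
          intro p hp
          obtain ⟨card, hcard, rfl⟩ := List.mem_map.mp hp
          have hcp : card ∈ pre := (PySem.List.mem_dedup pre card).mp hcard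
          intro h
          exact hmem ((eq_of_beq h) ▸ hcp)
        simp only [PySem.Dict.insert, PySem.Dict.contains, hc, Bool.false_eq_true, if_false]
        rw [dedup_append_singleton, if_neg hmem]
        simp
    rw [List.foldl_cons, hx]
    simp only
    rw [hstep, ih (pre ++ [x]) (fun c hc => hv c (by simp [hc]))]
    congr 1
    simp

-- (A) the dict loop builds exactly the deduplicated card list paired with its rank
theorem dict_items_eq (fin_list : List String) (h : ∀ card ∈ fin_list, validCard card) :
    (fin_list.foldl (fun d elt =>
      match rankOfCardA elt with
      | some v => d.insert elt v
      | none => d) PySem.Dict.empty).items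
    = (PySem.List.dedup fin_list).map (fun card => (card, rv card)) := by
  have := dict_fold_items fin_list [] h
  simpa [PySem.List.dedup, PySem.Set.ofList, PySem.Set.empty, PySem.Dict.empty] using this

theorem insertBy_append_skip {α : Type} (bef : α → α → Bool) (x : α) (as bs : List α)
    (h : ∀ a ∈ as, bef x a = false) :
    PySem.List.insertBy bef x (as ++ bs) = as ++ PySem.List.insertBy bef x bs := by
  induction as with
  | nil => simp
  | cons a as ih =>
    simp only [List.cons_append, PySem.List.insertBy, h a (by simp)]
    simp only [Bool.false_eq_true, if_false]
    rw [ih (fun a ha => h a (by simp [ha]))]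

-- inserting one element into a bucket concatenation appends it to its own bucket
theorem insertBy_bucket (R : List Int) (hR : R.Pairwise (fun a b => b < a))
    (x : String × Int) (hx : x.2 ∈ R) (xs : List (String × Int)) :
    PySem.List.insertBy (fun a b => decide (b.2 < a.2)) x
      (R.flatMap (fun r => xs.filter (fun p => p.2 == r)))
    = R.flatMap (fun r => (xs ++ [x]).filter (fun p => p.2 == r)) := by
  induction R with
  | nil => exact absurd hx (by simp)
  | cons r0 R ih =>
    have hRlt : ∀ r ∈ R, r < r0 := fun r hr => (List.pairwise_cons.mp hR).1 r hr
    have hR' := (List.pairwise_cons.mp hR).2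
    simp only [List.flatMap_cons]
    by_cases hxr : x.2 = r0
    · -- x joins the first bucket; later buckets unchanged
      have hskip : ∀ a ∈ xs.filter (fun p => p.2 == r0),
          (fun a b => decide (b.2 < a.2)) x a = false := by
        intro a ha
        have ha0 : a.2 = r0 := by simpa using (List.mem_filter.mp ha).2
        simp [ha0, hxr]
      rw [insertBy_append_skip _ _ _ _ hskip]
      have h1 : (xs ++ [x]).filter (fun p => p.2 == r0)
          = xs.filter (fun p => p.2 == r0) ++ [x] := by
        simp [List.filter_append, hxr]
      have h2 : R.flatMap (fun r => (xs ++ [x]).filter (fun p => p.2 == r))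
          = R.flatMap (fun r => xs.filter (fun p => p.2 == r)) := by
        apply List.flatMap_congr
        intro r hr
        have : x.2 ≠ r := by have := hRlt r hr; omega
        simp [List.filter_append, this]
      rw [h1, h2, List.append_assoc]
      congr 1
      have hall : ∀ a ∈ R.flatMap (fun r => xs.filter (fun p => p.2 == r)), a.2 < x.2 := by
        intro a ha
        obtain ⟨r, hr, haf⟩ := List.mem_flatMap.mp ha
        have ha0 : a.2 = r := by simpa using (List.mem_filter.mp haf).2
        have := hRlt r hr
        omega
      cases hrest : R.flatMap (fun r => xs.filter (fun p => p.2 == r)) with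
      | nil => simp [PySem.List.insertBy]
      | cons h t =>
        have : h.2 < x.2 := hall h (by rw [hrest]; simp)
        simp [PySem.List.insertBy, this]
    · have hxR : x.2 ∈ R := by
        rcases List.mem_cons.mp hx with h | h
        · exact absurd h hxr
        · exact h
      have hskip : ∀ a ∈ xs.filter (fun p => p.2 == r0),
          (fun a b => decide (b.2 < a.2)) x a = false := by
        intro a ha
        have ha0 : a.2 = r0 := by simpa using (List.mem_filter.mp ha).2
        have : x.2 < r0 := hRlt _ hxR
        simp only [decide_eq_false_iff_not, not_lt, ha0]
        omega
      rw [insertBy_append_skip _ _ _ _ hskip]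
      have h1 : (xs ++ [x]).filter (fun p => p.2 == r0) = xs.filter (fun p => p.2 == r0) := by
        simp [List.filter_append, hxr]
      rw [h1, ih hR' hxR]

-- (A) stable reverse sort on rank values = concatenation of the rank buckets
theorem sorted_rev_buckets (xs : List (String × Int)) (R : List Int)
    (hR : R.Pairwise (fun a b => b < a)) (hall : ∀ p ∈ xs, p.2 ∈ R) :
    PySem.List.sorted xs (fun p => p.2) true
    = R.flatMap (fun r => xs.filter (fun p => p.2 == r)) := by
  rw [PySem.List.sorted_rev_eq_foldl_insertBy]
  induction xs using List.reverseRecOn with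
  | nil => simp
  | append_singleton xs x ih =>
    rw [List.foldl_append, List.foldl_cons, List.foldl_nil,
      ih (fun p hp => hall p (by simp [hp]))]
    exact insertBy_bucket R hR x (hall x (by simp)) xs

-- (B) one inner pass appends the ordered dedup of the cards matching P
theorem innerFold (P : String → Bool) (l : List String) :
    ∀ acc₁ acc₂ : List String, (∀ x ∈ acc₁, P x = false) →
    l.foldl (fun acc card => if P card && !acc.contains card then acc ++ [card] else acc)
        (acc₁ ++ acc₂)
    = acc₁ ++ (l.filter P).foldl PySem.Set.add acc₂ := by
  induction l with
  | nil => intro acc₁ acc₂ h; simp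
  | cons x l ih =>
    intro acc₁ acc₂ h
    by_cases hp : P x
    · have hx1 : x ∉ acc₁ := fun hx => by simp [h x hx] at hp
      have hc : (acc₁ ++ acc₂).contains x = acc₂.contains x := by
        simp [List.contains_eq_mem, hx1]
      have hstep : (if (P x && !((acc₁ ++ acc₂).contains x)) = true
            then acc₁ ++ acc₂ ++ [x] else acc₁ ++ acc₂)
          = acc₁ ++ PySem.Set.add acc₂ x := by
        by_cases hm : x ∈ acc₂ <;>
          simp [PySem.Set.add, PySem.Set.contains, hp, hx1, hm, List.append_assoc,
            List.contains_eq_mem]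
      rw [List.foldl_cons, hstep, ih acc₁ (PySem.Set.add acc₂ x) h,
        List.filter_cons_of_pos hp, List.foldl_cons]
    · rw [List.foldl_cons, List.filter_cons_of_neg (by simpa using hp)]
      have hstep : (if (P x && !((acc₁ ++ acc₂).contains x)) = true
            then acc₁ ++ acc₂ ++ [x] else acc₁ ++ acc₂) = acc₁ ++ acc₂ := by
        simp [hp]
      rw [hstep]
      exact ih acc₁ acc₂ h

-- (B) the whole double loop builds the per-rank buckets of deduplicated cards
theorem resultEq (fin_list : List String) (cs : List Char) :
    ∀ acc : List String, cs.Nodup →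
      (∀ x ∈ acc, ∀ c ∈ cs, (PySem.Str.pyGet? x 0 == some c) = false) →
    cs.foldl (fun acc r => fin_list.foldl (fun acc card =>
        if (PySem.Str.pyGet? card 0 == some r) && !(acc.contains card) then acc ++ [card]
        else acc) acc) acc
    = acc ++ cs.flatMap (fun c =>
        PySem.List.dedup (fin_list.filter (fun card => PySem.Str.pyGet? card 0 == some c))) := by
  induction cs with
  | nil => intro acc _ _; simp
  | cons c cs ih =>
    intro acc hnd h
    have hstep := innerFold (fun card => PySem.Str.pyGet? card 0 == some c) fin_list acc []
      (fun x hx => h x hx c (by simp))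
    simp only [List.append_nil] at hstep
    have hded : (fin_list.filter (fun card => PySem.Str.pyGet? card 0 == some c)).foldl
        PySem.Set.add []
        = PySem.List.dedup (fin_list.filter (fun card => PySem.Str.pyGet? card 0 == some c)) := by
      rfl
    rw [List.foldl_cons, hstep, hded]
    rw [ih _ (List.nodup_cons.mp hnd).2 ?hnew]
    · rw [List.flatMap_cons, List.append_assoc]
    case hnew =>
      intro x hx c' hc'
      rcases List.mem_append.mp hx with hxa | hxd
      · exact h x hxa c' (by simp [hc'])
      · have hPx : PySem.List.pyGet? x.toList 0 = some c := by
          have := (List.mem_filter.mp ((PySem.List.mem_dedup _ x).mp hxd)).2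
          simpa [PySem.Str.pyGet?] using this
        have hne : c ≠ c' := fun he => (List.nodup_cons.mp hnd).1 (he ▸ hc')
        simp [PySem.Str.pyGet?, hPx, hne]

theorem rkVal_map : rkChars.map rkVal = [13,12,11,10,9,8,7,6,5,4,3,2,1] := by decide

theorem rkVal_inj : ∀ h ∈ rkChars, ∀ c ∈ rkChars, (rkVal h = rkVal c ↔ h = c) := by
  have hnd : (rkChars.map rkVal).Nodup := by rw [rkVal_map]; decide
  intro h hh c hc
  exact ⟨fun hv => List.inj_on_of_nodup_map hnd hh hc hv, fun hv => hv ▸ rfl⟩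

-- the two card sequences coincide
theorem lists_eq (fin_list : List String) (h : ∀ card ∈ fin_list, validCard card) :
    (PySem.List.sorted
        ((PySem.List.dedup fin_list).map (fun card => (card, rv card)))
        (fun x => x.2) true).map (fun p => p.1)
    = rkChars.flatMap (fun c =>
        PySem.List.dedup (fin_list.filter (fun card => PySem.Str.pyGet? card 0 == some c))) := by
  have hD : ∀ card ∈ PySem.List.dedup fin_list, validCard card :=
    fun card hc => h card ((PySem.List.mem_dedup _ _).mp hc)
  have hall : ∀ p ∈ (PySem.List.dedup fin_list).map (fun card => (card, rv card)),
      p.2 ∈ rkChars.map rkVal := by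
    intro p hp
    obtain ⟨card, hcard, rfl⟩ := List.mem_map.mp hp
    obtain ⟨c, hc, _, hrv⟩ := head_spec card (hD card hcard)
    exact List.mem_map.mpr ⟨c, hc, hrv.symm⟩
  rw [sorted_rev_buckets _ (rkChars.map rkVal) (by decide) hall, List.map_flatMap,
    List.flatMap_map]
  apply List.flatMap_congr
  intro c hc
  rw [dedup_filter]
  rw [List.filter_map]
  rw [List.map_map]
  have hid : ((fun p => p.1) ∘ fun card => (card, rv card)) = fun card : String => card := rfl
  rw [hid]
  simp only [List.map_id_fun', id]
  apply List.filter_congr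
  intro card hcard
  obtain ⟨hch, hmemc, hget, hrv⟩ := head_spec card (hD card hcard)
  simp only [Function.comp]
  rw [hget, hrv]
  by_cases he : hch = c
  · simp [he]
  · have hne : rkVal hch ≠ rkVal c := fun hv => he ((rkVal_inj hch hmemc c hc).mp hv)
    simp [he, hne]

-- equal card sequences give equal output folds
theorem fold_congr (l₁ : List (String × Int)) (l₂ : List String)
    (hl : l₁.map (fun p => p.1) = l₂) (idxs : List Int) (s : List Char) :
    idxs.foldl (fun s i =>
      match PySem.List.pyGet? l₁ i with
      | some p => s ++ p.1.toList
      | none => s) s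
    = idxs.foldl (fun s i =>
      match PySem.List.pyGet? l₂ i with
      | some card => s ++ card.toList
      | none => s) s := by
  induction idxs generalizing s with
  | nil => rfl
  | cons i idxs ih =>
    have hget : PySem.List.pyGet? l₂ i = (PySem.List.pyGet? l₁ i).map (fun p => p.1) := by
      rw [← hl]
      simp [PySem.List.pyGet?, List.getElem?_map]
    rw [List.foldl_cons, List.foldl_cons, ih]
    congr 1
    rw [hget]
    cases PySem.List.pyGet? l₁ i <;> simp

-- ===== VERDICT (by name: the statement is the Claim_ definition above) =====
theorem kicker_spec : Claim_equal_kicker := by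
  intro fin_list num_kickers ret_list _ hpre
  obtain ⟨hrl, hne, hv0, _⟩ := hpre
  have hvalid : ∀ card ∈ fin_list, validCard card := fun card hc =>
    ⟨(hv0 card hc).1, (hv0 card hc).2⟩
  subst hrl
  unfold Spec_kicker kicker kicker_alt
  have hlen : ¬ fin_list.length = 0 := by simpa using hne
  rw [if_neg hlen, if_neg hlen]
  simp only [Bool.false_eq_true, if_false]
  have hcs : "AKQJT98765432".toList = rkChars := by decide
  rw [hcs]
  have hB := resultEq fin_list rkChars [] (by decide) (by intro x hx; simp at hx)
  simp only [List.nil_append] at hB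
  rw [hB]
  have hA := dict_items_eq fin_list hvalid
  rw [hA]
  exact congrArg String.mk (fold_congr _ _ (lists_eq fin_list hvalid) _ [])
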